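-- pv_equiv track=rewrite | github.com/CodingWithLaura/advent_of_code_2020 | day_3/toboggan_trajectory.py | slope_to_coordinates
-- ===== SOURCE A (Python) =====
-- def slope_to_coordinates(rightsteps,downsteps,laenge_x,laenge_y):
--     akku_x = 0
--     akku_y = 0
--     slope_coordinates = []
--     while (akku_y < laenge_y):
--         slope_coordinates.append((akku_x,akku_y))
--
--         akku_x = (akku_x + rightsteps) % laenge_x
--         akku_y += downsteps
--     return slope_coordinates
-- ===== SOURCE B (Python) =====
-- def slope_to_coordinates(rightsteps, downsteps, laenge_x, laenge_y):
--     n = -(-laenge_y // downsteps) if laenge_y > 0 else 0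
--     return [((i * rightsteps) % laenge_x, i * downsteps) for i in range(n)]
-- ===== Notes on version B (the rewrite author's own statement) =====
-- stated objective: simpler
-- what changed: Replaces the running akku_x/akku_y accumulator loop by a closed-form count of steps (ceiling division) and a comprehension computing each coordinate directly from its index i as ((i*rightsteps) % laenge_x, i*downsteps).
import Mathlib
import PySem

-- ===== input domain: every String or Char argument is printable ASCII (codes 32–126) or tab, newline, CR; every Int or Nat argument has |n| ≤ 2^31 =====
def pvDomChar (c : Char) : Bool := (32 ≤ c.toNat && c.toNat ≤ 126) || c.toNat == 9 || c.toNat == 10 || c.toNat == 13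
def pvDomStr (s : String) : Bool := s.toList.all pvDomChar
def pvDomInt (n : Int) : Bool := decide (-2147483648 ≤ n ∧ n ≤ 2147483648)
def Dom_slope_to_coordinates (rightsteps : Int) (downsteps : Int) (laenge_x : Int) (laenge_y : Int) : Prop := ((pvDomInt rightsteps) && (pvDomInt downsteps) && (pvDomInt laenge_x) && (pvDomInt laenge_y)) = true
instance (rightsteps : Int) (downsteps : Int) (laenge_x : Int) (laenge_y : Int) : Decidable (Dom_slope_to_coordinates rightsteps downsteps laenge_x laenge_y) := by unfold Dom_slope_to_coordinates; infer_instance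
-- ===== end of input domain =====

-- B replaces A's running akku_x/akku_y accumulators by a closed-form step count
-- (ceiling division) and computes each coordinate directly from its index (objective: simpler).

-- ===== PORT A =====
-- A's while loop; the extra '0 < downsteps' guard only makes the recursion total
-- (Python diverges there, which Pre_ excludes).
def pvLoopA (rightsteps downsteps laenge_x laenge_y akku_x akku_y : Int)
    (acc : List (Int × Int)) : List (Int × Int) :=
  if _h : akku_y < laenge_y ∧ 0 < downsteps then
    pvLoopA rightsteps downsteps laenge_x laenge_y
      (PySem.Int.mod (akku_x + rightsteps) laenge_x) (akku_y + downsteps)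
      (acc ++ [(akku_x, akku_y)])
  else acc
termination_by (laenge_y - akku_y).toNat
decreasing_by omega

def slope_to_coordinates (rightsteps : Int) (downsteps : Int) (laenge_x : Int) (laenge_y : Int) : List (Int × Int) :=
  pvLoopA rightsteps downsteps laenge_x laenge_y 0 0 []

-- ===== PORT B =====
def slope_to_coordinates_alt (rightsteps : Int) (downsteps : Int) (laenge_x : Int) (laenge_y : Int) : List (Int × Int) :=
  let n : Int := if 0 < laenge_y then -(PySem.Int.floordiv (-laenge_y) downsteps) else 0
  (PySem.List.pyRange 0 n 1).map (fun i => (PySem.Int.mod (i * rightsteps) laenge_x, i * downsteps))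

-- ===== PRECONDITION & SPEC =====
-- A returns iff the loop never runs (laenge_y ≤ 0) or it runs with a positive step and a
-- nonzero modulus: with laenge_y > 0, downsteps ≤ 0 makes A loop forever and laenge_x = 0
-- makes it raise ZeroDivisionError.
def Pre_slope_to_coordinates (rightsteps : Int) (downsteps : Int) (laenge_x : Int) (laenge_y : Int) : Prop :=
  laenge_y ≤ 0 ∨ (0 < downsteps ∧ laenge_x ≠ 0)
instance (rightsteps : Int) (downsteps : Int) (laenge_x : Int) (laenge_y : Int) : Decidable (Pre_slope_to_coordinates rightsteps downsteps laenge_x laenge_y) := by unfold Pre_slope_to_coordinates; infer_instance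

def pvWitness_slope_to_coordinates : Int × Int × Int × Int := (3, 1, 5, 4)

def Spec_slope_to_coordinates (rightsteps : Int) (downsteps : Int) (laenge_x : Int) (laenge_y : Int) (out : List (Int × Int)) : Prop := out = slope_to_coordinates_alt rightsteps downsteps laenge_x laenge_y
instance (rightsteps : Int) (downsteps : Int) (laenge_x : Int) (laenge_y : Int) (out : List (Int × Int)) : Decidable (Spec_slope_to_coordinates rightsteps downsteps laenge_x laenge_y out) := by unfold Spec_slope_to_coordinates; infer_instance

-- ===== CLAIM (what is proved, stated in full; the proofs are below) =====
def Claim_equal_slope_to_coordinates : Prop := ∀ (rightsteps : Int) (downsteps : Int) (laenge_x : Int) (laenge_y : Int), Dom_slope_to_coordinates rightsteps downsteps laenge_x laenge_y → Pre_slope_to_coordinates rightsteps downsteps laenge_x laenge_y → Spec_slope_to_coordinates rightsteps downsteps laenge_x laenge_y (slope_to_coordinates rightsteps downsteps laenge_x laenge_y)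

-- ===== LEMMAS AND PROOFS =====

-- loop invariant: after k iterations the state is (mod (k*r) lx, k*d), and the loop
-- emits exactly the coordinates for the remaining indices k, k+1, …, n-1.
lemma pvLoopA_eq (r d lx ly : Int) (hd : 0 < d) (n : Int)
    (hn : ∀ k : Int, k * d < ly ↔ k < n) :
    ∀ (m : Nat) (k : Int) (acc : List (Int × Int)), (ly - k * d).toNat ≤ m →
      pvLoopA r d lx ly (PySem.Int.mod (k * r) lx) (k * d) acc
        = acc ++ (PySem.List.pyRange k n 1).map
            (fun i => (PySem.Int.mod (i * r) lx, i * d)) := by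
  intro m
  induction m with
  | zero =>
    intro k acc hm
    have hkd : ¬ k * d < ly := by omega
    have hkn : n ≤ k := by have := (hn k).not; omega
    rw [pvLoopA]
    simp [hkd, PySem.List.pyRange_one_eq_nil hkn]
  | succ m ih =>
    intro k acc hm
    by_cases hkd : k * d < ly
    · have hkn : k < n := (hn k).mp hkd
      rw [pvLoopA]
      simp only [hkd, hd, and_self, dite_true]
      have hx : PySem.Int.mod (PySem.Int.mod (k * r) lx + r) lx
          = PySem.Int.mod ((k + 1) * r) lx := by
        simp only [PySem.Int.mod]
        rw [Int.fmod_add_fmod]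
        ring_nf
      have hy : k * d + d = (k + 1) * d := by ring
      rw [hx, hy, ih (k + 1) (acc ++ [(PySem.Int.mod (k * r) lx, k * d)]) (by omega)]
      rw [PySem.List.pyRange_one_cons hkn]
      simp
    · have hkn : n ≤ k := by have := (hn k).not; omega
      rw [pvLoopA]
      simp [hkd, PySem.List.pyRange_one_eq_nil hkn]

-- ===== VERDICT (by name: the statement is the Claim_ definition above) =====
theorem slope_to_coordinates_spec : Claim_equal_slope_to_coordinates := by
  intro r d lx ly _hDom hPre
  unfold Spec_slope_to_coordinates slope_to_coordinates slope_to_coordinates_alt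
  by_cases hly : 0 < ly
  · have hd : 0 < d := by
      rcases hPre with h | h
      · omega
      · exact h.1
    set n : Int := -(PySem.Int.floordiv (-ly) d) with hn_def
    obtain ⟨hlo, hhi⟩ := (PySem.Int.neg_floordiv_neg_eq_iff_of_pos (a := ly) (b := d) (q := n) hd).mp rfl
    have hn : ∀ k : Int, k * d < ly ↔ k < n := by
      intro k
      constructor
      · intro h
        by_contra hnk
        rw [not_lt] at hnk
        nlinarith
      · intro h
        nlinarith
    have h0 : pvLoopA r d lx ly 0 0 []
        = pvLoopA r d lx ly (PySem.Int.mod ((0 : Int) * r) lx) ((0 : Int) * d) [] := by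
      norm_num [PySem.Int.mod]
    rw [h0, pvLoopA_eq r d lx ly hd n hn (ly - 0 * d).toNat 0 [] (le_refl _)]
    simp [hly]
  · rw [pvLoopA]
    simp [hly]
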